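-- pv_equiv track=rewrite | github.com/crhistianperez92/testingapi | models.py | estructura_estadisticas
-- ===== SOURCE A (Python) =====
-- def estructura_estadisticas(tipo, objecto):
--     data = []
--     for obj in objecto:
--         if tipo == 1:
--             data.append({
--                 "state": obj[0],
--                 "city": obj[1],
--                 "rating": obj[2],
--                 "total": obj[3]
--             })
--         if tipo == 2:
--             data.append({
--                 "state": obj[0],
--                 "rating": obj[1],
--                 "total": obj[2]
--             })
--         if tipo == 3:
--             data.append({
--                 "rating": obj[0],
--                 "total": obj[1]
--             })
--     return data
-- ===== SOURCE B (Python) =====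
-- def estructura_estadisticas(tipo, objecto):
--     # Column-major: build one column of (key, value) pairs per schema field,
--     # then transpose the columns back into per-row dicts.
--     keys = {1: ["state", "city", "rating", "total"],
--             2: ["state", "rating", "total"],
--             3: ["rating", "total"]}.get(tipo)
--     if keys is None:
--         return []
--     columns = [[(k, obj[i]) for obj in objecto] for i, k in enumerate(keys)]
--     return [dict(col[j] for col in columns) for j in range(len(objecto))]
-- ===== Notes on version B (the rewrite author's own statement) =====
-- stated objective: alternative
-- what changed: B works column-major: it builds one (key,value) column per schema field across all rows, then a second pass transposes the columns back into per-row dicts, instead of A's single row-major pass with three in-loop tipo branches.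
import Mathlib
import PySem

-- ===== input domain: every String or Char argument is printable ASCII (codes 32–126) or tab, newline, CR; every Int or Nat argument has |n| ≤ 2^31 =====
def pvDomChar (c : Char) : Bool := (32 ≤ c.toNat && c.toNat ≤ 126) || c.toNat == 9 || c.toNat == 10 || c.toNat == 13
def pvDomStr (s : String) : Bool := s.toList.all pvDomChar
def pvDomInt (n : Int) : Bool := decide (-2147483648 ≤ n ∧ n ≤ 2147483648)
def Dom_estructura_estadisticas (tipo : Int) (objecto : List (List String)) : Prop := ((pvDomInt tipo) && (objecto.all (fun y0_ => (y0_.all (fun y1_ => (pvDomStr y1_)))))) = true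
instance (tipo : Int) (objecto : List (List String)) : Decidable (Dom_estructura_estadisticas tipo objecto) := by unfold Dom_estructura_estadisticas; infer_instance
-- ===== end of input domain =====

-- B builds one (key,value) column per schema field, then transposes the columns into per-row dicts (alternative, column-major decomposition).


-- ===== PORT A =====
-- obj[i] in Python raises IndexError when out of range; Pre_ excludes those inputs, so the default is never used.
def pvGetS (obj : List String) (i : Int) : String := PySem.List.pyGetD obj i ""

def estructura_estadisticas (tipo : Int) (objecto : List (List String)) : List (List (String × String)) :=
  objecto.foldl (fun data obj =>
    let data := if tipo == 1 then
      data ++ [[("state", pvGetS obj 0), ("city", pvGetS obj 1), ("rating", pvGetS obj 2), ("total", pvGetS obj 3)]]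
      else data
    let data := if tipo == 2 then
      data ++ [[("state", pvGetS obj 0), ("rating", pvGetS obj 1), ("total", pvGetS obj 2)]]
      else data
    if tipo == 3 then
      data ++ [[("rating", pvGetS obj 0), ("total", pvGetS obj 1)]]
      else data) []

-- ===== PORT B =====
-- col[j] with j in range: default never used under Pre_ (all columns have length len(objecto)).
def pvGetP (col : List (String × String)) (j : Int) : String × String := PySem.List.pyGetD col j ("", "")

def pvSchemas : PySem.Dict Int (List String) :=
  PySem.Dict.mk [(1, ["state", "city", "rating", "total"]), (2, ["state", "rating", "total"]), (3, ["rating", "total"])]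

-- dict(col[j] for col in columns): the schema keys are pairwise distinct literals, so the
-- insertion-order association list is exactly the list of pairs itself.
def estructura_estadisticas_alt_core (objecto : List (List String)) (keys : List String) : List (List (String × String)) :=
  let columns := (PySem.List.enumerate keys).map
    (fun ik => objecto.map (fun obj => (ik.2, pvGetS obj ik.1)))
  (PySem.List.pyRange 0 (PySem.List.len objecto) 1).map
    (fun j => columns.map (fun col => pvGetP col j))

def estructura_estadisticas_alt (tipo : Int) (objecto : List (List String)) : List (List (String × String)) :=
  match pvSchemas.get? tipo with
  | none => []
  | some keys => estructura_estadisticas_alt_core objecto keys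

-- ===== PRECONDITION & SPEC =====
-- Pre_ excludes exactly the inputs where Python A (and B alike) raises IndexError: a row shorter than
-- the schema selected by tipo.
def Pre_estructura_estadisticas (tipo : Int) (objecto : List (List String)) : Prop :=
  (tipo = 1 → ∀ obj ∈ objecto, 4 ≤ obj.length) ∧
  (tipo = 2 → ∀ obj ∈ objecto, 3 ≤ obj.length) ∧
  (tipo = 3 → ∀ obj ∈ objecto, 2 ≤ obj.length)
instance (tipo : Int) (objecto : List (List String)) : Decidable (Pre_estructura_estadisticas tipo objecto) := by unfold Pre_estructura_estadisticas; infer_instance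

def pvWitness_estructura_estadisticas : Int × List (List String) := (2, [["NY", "4", "10"], ["CA", "5", "7"]])

def Spec_estructura_estadisticas (tipo : Int) (objecto : List (List String)) (out : List (List (String × String))) : Prop := out = estructura_estadisticas_alt tipo objecto
instance (tipo : Int) (objecto : List (List String)) (out : List (List (String × String))) : Decidable (Spec_estructura_estadisticas tipo objecto out) := by unfold Spec_estructura_estadisticas; infer_instance

-- ===== CLAIM (what is proved, stated in full; the proofs are below) =====
def Claim_equal_estructura_estadisticas : Prop := ∀ (tipo : Int) (objecto : List (List String)), Dom_estructura_estadisticas tipo objecto → Pre_estructura_estadisticas tipo objecto → Spec_estructura_estadisticas tipo objecto (estructura_estadisticas tipo objecto)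

-- ===== LEMMAS AND PROOFS =====

theorem pv_flatten_map_singleton {α β : Type} (f : α → β) (l : List α) :
    (l.map (fun x => [f x])).flatten = l.map f := by
  induction l with
  | nil => rfl
  | cons x xs ih => simp [ih]

-- Transposing the column-major build recovers the row-major map.
theorem pv_transpose_eq {α β γ : Type} (l : List α) (ks : List γ) (g : γ → α → β) (d : β) :
    (PySem.List.pyRange 0 (PySem.List.len l) 1).map
        (fun j => ks.map (fun k => PySem.List.pyGetD (l.map (g k)) j d))
      = l.map (fun x => ks.map (fun k => g k x)) := by
  apply List.ext_getElem
  · simp [PySem.List.length_pyRange_one, PySem.List.len]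
  · intro n h1 h2
    have hn : n < l.length := by
      simpa [PySem.List.length_pyRange_one, PySem.List.len] using h1
    simp only [List.getElem_map, PySem.List.getElem_pyRange_one, zero_add]
    apply List.map_congr_left
    intro k _
    rw [PySem.List.pyGetD_natCast]
    simp [List.getD, hn]

theorem pv_rows_eq (objecto : List (List String)) (keys : List String) :
    estructura_estadisticas_alt_core objecto keys
      = objecto.map (fun obj =>
          (PySem.List.enumerate keys).map (fun ik => (ik.2, pvGetS obj ik.1))) := by
  unfold estructura_estadisticas_alt_core
  simp only [List.map_map, Function.comp_def, pvGetP]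
  exact pv_transpose_eq objecto (PySem.List.enumerate keys)
    (fun ik obj => (ik.2, pvGetS obj ik.1)) ("", "")

-- ===== VERDICT (by name: the statement is the Claim_ definition above) =====
theorem estructura_estadisticas_spec : Claim_equal_estructura_estadisticas := by
  intro tipo objecto _ _
  unfold Spec_estructura_estadisticas estructura_estadisticas
  by_cases h1 : tipo = 1
  · subst h1
    rw [show estructura_estadisticas_alt 1 objecto = estructura_estadisticas_alt_core objecto ["state", "city", "rating", "total"] from rfl,
        pv_rows_eq]
    simp [PySem.List.enumerate_cons, PySem.List.enumerate_nil, pv_flatten_map_singleton]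
  · by_cases h2 : tipo = 2
    · subst h2
      rw [show estructura_estadisticas_alt 2 objecto = estructura_estadisticas_alt_core objecto ["state", "rating", "total"] from rfl,
          pv_rows_eq]
      simp [PySem.List.enumerate_cons, PySem.List.enumerate_nil, pv_flatten_map_singleton]
    · by_cases h3 : tipo = 3
      · subst h3
        rw [show estructura_estadisticas_alt 3 objecto = estructura_estadisticas_alt_core objecto ["rating", "total"] from rfl,
            pv_rows_eq]
        simp [PySem.List.enumerate_cons, PySem.List.enumerate_nil, pv_flatten_map_singleton]
      · have e1 : ((1 : Int) == tipo) = false := by simp; omega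
        have e2 : ((2 : Int) == tipo) = false := by simp; omega
        have e3 : ((3 : Int) == tipo) = false := by simp; omega
        unfold estructura_estadisticas_alt
        simp [pvSchemas, PySem.Dict.get?, List.find?, e1, e2, e3, h1, h2, h3, List.foldl_fixed]
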